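-- pv_equiv track=rewrite | github.com/iamez/slomix | tools/slomix_proximity.py | _zones_normalize_name
-- ===== SOURCE A (Python) =====
-- def _zones_normalize_name(name: str) -> str:
--     out = []
--     prev_us = False
--     for ch in (name or "").lower():
--         if ch.isalnum():
--             out.append(ch)
--             prev_us = False
--         else:
--             if not prev_us:
--                 out.append("_")
--                 prev_us = True
--     return "".join(out).strip("_") or "objective"
-- ===== SOURCE B (Python) =====
-- def _zones_normalize_name(name: str) -> str:
--     masked = "".join(ch if ch.isalnum() else "_" for ch in (name or "").lower())
--     tokens = [t for t in masked.split("_") if t]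
--     return "_".join(tokens) or "objective"
-- ===== Notes on version B (the rewrite author's own statement) =====
-- stated objective: idiomatic
-- what changed: Replaces A's stateful single pass (prev_us flag deciding per character whether to emit an underscore, then strip) by a staged tokenization: mask every non-alnum char to '_', split on '_', drop the empty tokens, and join the tokens with '_'; no per-character state and no final strip.
import Mathlib
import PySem

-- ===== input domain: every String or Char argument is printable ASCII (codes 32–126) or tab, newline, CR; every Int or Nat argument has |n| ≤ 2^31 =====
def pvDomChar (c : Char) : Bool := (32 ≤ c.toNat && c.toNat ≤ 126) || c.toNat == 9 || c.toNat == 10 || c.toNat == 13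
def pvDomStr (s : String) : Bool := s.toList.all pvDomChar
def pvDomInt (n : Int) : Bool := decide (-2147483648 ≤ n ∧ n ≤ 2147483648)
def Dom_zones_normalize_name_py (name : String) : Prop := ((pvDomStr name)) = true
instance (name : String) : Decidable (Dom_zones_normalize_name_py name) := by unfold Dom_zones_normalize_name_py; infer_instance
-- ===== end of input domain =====

-- B replaces A's stateful single pass (prev_us flag + final strip) by staged
-- tokenization: mask non-alnum chars to '_', split on '_', drop empty tokens,
-- join with '_'; objective: idiomatic.

-- ===== PORT A =====
def zones_normalize_name_py (name : String) : String :=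
  -- (name or "") = name for strings (the empty string is falsy and yields "")
  let st := (PySem.Str.lower name).toList.foldl
    (fun (st : List Char × Bool) ch =>
      if PySem.Chars.isalnum ch then (st.1 ++ [ch], false)
      else if !st.2 then (st.1 ++ ['_'], true) else st)
    ([], false)
  let r := PySem.Str.stripChars (String.ofList st.1) "_"
  if r = "" then "objective" else r

-- ===== PORT B =====
def zones_normalize_name_py_alt (name : String) : String :=
  let masked := (PySem.Str.lower name).toList.map
    (fun ch => if PySem.Chars.isalnum ch then ch else '_')
  let tokens := (PySem.Chars.splitOn masked ['_']).filter (fun t => !t.isEmpty)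
  let r := PySem.Chars.join ['_'] tokens
  if r.isEmpty then "objective" else String.ofList r

-- ===== PRECONDITION & SPEC =====
def Spec_zones_normalize_name_py (name : String) (out : String) : Prop := out = zones_normalize_name_py_alt name
instance (name : String) (out : String) : Decidable (Spec_zones_normalize_name_py name out) := by unfold Spec_zones_normalize_name_py; infer_instance

-- ===== CLAIM (what is proved, stated in full; the proofs are below) =====
def Claim_equal_zones_normalize_name_py : Prop := ∀ (name : String), Dom_zones_normalize_name_py name → Spec_zones_normalize_name_py name (zones_normalize_name_py name)

-- ===== LEMMAS AND PROOFS =====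

-- A's loop, as a recursion (prev_us flag)
def pvCore : Bool → List Char → List Char
  | _, [] => []
  | prev, c :: cs =>
    if PySem.Chars.isalnum c then c :: pvCore false cs
    else if prev then pvCore true cs else '_' :: pvCore true cs

-- the same collapse, driven by the masked character ('_' vs other)
def pvCCore : Bool → List Char → List Char
  | _, [] => []
  | prev, c :: cs =>
    if c = '_' then (if prev then pvCCore true cs else '_' :: pvCCore true cs)
    else c :: pvCCore false cs

def pvMask (l : List Char) : List Char :=
  l.map (fun ch => if PySem.Chars.isalnum ch then ch else '_')

-- maximal runs of non-'_' characters
def pvToks : List Char → List (List Char)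
  | [] => []
  | c :: cs =>
    if c = '_' then pvToks cs
    else (c :: cs.takeWhile (fun a => !(a == '_'))) ::
      pvToks (cs.dropWhile (fun a => !(a == '_')))
termination_by l => l.length
decreasing_by
  · simp only [List.length_cons]; omega
  · simp only [List.length_cons]
    exact Nat.lt_succ_of_le (List.length_dropWhile_le _ _)

def pvUS (c : Char) : Bool := ['_'].contains c

theorem pvUS_eq (c : Char) : pvUS c = (c == '_') := by
  unfold pvUS
  rw [List.contains_cons]
  simp

def pvStripR (l : List Char) : List Char := (List.dropWhile pvUS l.reverse).reverse

theorem pvFoldl_core (l : List Char) (st : List Char × Bool) :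
    (l.foldl (fun (st : List Char × Bool) ch =>
      if PySem.Chars.isalnum ch then (st.1 ++ [ch], false)
      else if !st.2 then (st.1 ++ ['_'], true) else st) st).1
      = st.1 ++ pvCore st.2 l := by
  induction l generalizing st with
  | nil => simp [pvCore]
  | cons c cs ih =>
    simp only [List.foldl_cons]
    rw [ih]
    obtain ⟨a, b⟩ := st
    by_cases h : PySem.Chars.isalnum c
    · simp [pvCore, h]
    · cases b <;> simp [pvCore, h]

theorem pvCore_eq_ccore (l : List Char) : ∀ prev, pvCore prev l = pvCCore prev (pvMask l) := by
  induction l with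
  | nil => intro _; simp [pvCore, pvMask, pvCCore]
  | cons c cs ih =>
    intro prev
    by_cases h : PySem.Chars.isalnum c
    · have hc : ¬ c = '_' := by
        intro he; subst he; exact absurd h (by decide)
      simp [pvCore, pvMask, pvCCore, h, hc, ih]
    · simp only [pvMask, List.map_cons, if_neg h]
      cases prev <;>
        simpa [pvCore, pvCCore, h] using ih true

theorem pvCCore_true_dropWhile (m : List Char) :
    List.dropWhile pvUS (pvCCore true m) = pvCCore true m := by
  induction m with
  | nil => simp [pvCCore]
  | cons c cs ih =>
    by_cases h : c = '_'
    · simpa [pvCCore, h] using ih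
    · simp [pvCCore, h, pvUS_eq]

theorem pvCCore_false_dropWhile (m : List Char) :
    List.dropWhile pvUS (pvCCore false m) = pvCCore true m := by
  cases m with
  | nil => simp [pvCCore]
  | cons c cs =>
    by_cases h : c = '_'
    · simp only [pvCCore, if_pos h, Bool.false_eq_true, if_false]
      simp only [List.dropWhile_cons, pvUS_eq]
      simpa [pvCCore, h] using pvCCore_true_dropWhile cs
    · simp [pvCCore, h, pvUS_eq]

theorem pvCCore_all_us (m : List Char) (h : ∀ a ∈ m, a = '_') : pvCCore true m = [] := by
  induction m with
  | nil => rfl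
  | cons c cs ih =>
    have := h c (List.mem_cons_self ..)
    simp [pvCCore, this, ih (fun a ha => h a (List.mem_cons_of_mem _ ha))]

theorem pvCCore_run (t : List Char) (d : List Char) (h : ∀ a ∈ t, ¬ a = '_') :
    pvCCore false (t ++ d) = t ++ pvCCore false d := by
  induction t with
  | nil => rfl
  | cons c cs ih =>
    have hc := h c (List.mem_cons_self ..)
    simp [pvCCore, hc, ih (fun a ha => h a (List.mem_cons_of_mem _ ha))]

theorem pvStripR_no_us (x : List Char) (h : ∀ a ∈ x, ¬ a = '_') : pvStripR x = x := by
  unfold pvStripR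
  have hx : List.dropWhile pvUS x.reverse = x.reverse := by
    cases hx : x.reverse with
    | nil => rfl
    | cons e es =>
      have he : e ∈ x := by
        rw [← List.mem_reverse, hx]; exact List.mem_cons_self ..
      rw [List.dropWhile_cons, if_neg]
      simp [pvUS_eq, h e he]
  rw [hx, List.reverse_reverse]

theorem pvStripR_append_us (x y : List Char) (h : ∀ a ∈ y, a = '_') :
    pvStripR (x ++ y) = pvStripR x := by
  unfold pvStripR
  rw [List.reverse_append, List.dropWhile_append]
  have hy : List.dropWhile pvUS y.reverse = [] := by
    rw [List.dropWhile_eq_nil_iff]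
    intro a ha
    rw [pvUS_eq]
    simp [h a (List.mem_reverse.mp ha)]
  simp [hy]

theorem pvStripR_append_keep (x y : List Char) (h : List.dropWhile pvUS y.reverse ≠ []) :
    pvStripR (x ++ y) = x ++ pvStripR y := by
  unfold pvStripR
  rw [List.reverse_append, List.dropWhile_append, if_neg (by simpa [List.isEmpty_iff] using h)]
  rw [List.reverse_append, List.reverse_reverse]

theorem pvToks_all_us (m : List Char) (h : ∀ a ∈ m, a = '_') : pvToks m = [] := by
  induction m with
  | nil => rw [pvToks]
  | cons c cs ih =>
    have := h c (List.mem_cons_self ..)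
    rw [pvToks, if_pos this]
    exact ih (fun a ha => h a (List.mem_cons_of_mem _ ha))

theorem pvIntercalate_cons (w : List Char) (ts : List (List Char)) (h : ts ≠ []) :
    ['_'].intercalate (w :: ts) = w ++ '_' :: ['_'].intercalate ts := by
  cases ts with
  | nil => exact absurd rfl h
  | cons v vs => simp [List.intercalate, List.intersperse]

theorem pvToks_mem_ne_nil (m : List Char) : ∀ w ∈ pvToks m, w ≠ [] := by
  induction m using pvToks.induct with
  | case1 => rw [pvToks]; simp
  | case2 cs ih =>
    rw [pvToks, if_pos rfl]; exact ih
  | case3 c cs h ih =>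
    rw [pvToks, if_neg h]
    intro w hw
    rcases List.mem_cons.mp hw with rfl | hw
    · simp
    · exact ih w hw

theorem pvIntercalate_toks_ne_nil (m : List Char) (h : pvToks m ≠ []) :
    ['_'].intercalate (pvToks m) ≠ [] := by
  cases hm : pvToks m with
  | nil => exact absurd hm h
  | cons w ws =>
    have hw : w ≠ [] := pvToks_mem_ne_nil m w (by rw [hm]; exact List.mem_cons_self ..)
    cases ws with
    | nil => simpa [List.intercalate, List.intersperse] using hw
    | cons v vs =>
      rw [pvIntercalate_cons w (v :: vs) (by simp)]
      simp [hw]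

theorem pvToks_eq_nil_imp (m : List Char) : pvToks m = [] → ∀ a ∈ m, a = '_' := by
  induction m using pvToks.induct with
  | case1 => intro _; simp
  | case2 cs ih =>
    intro h
    rw [pvToks, if_pos rfl] at h
    intro a ha
    rcases List.mem_cons.mp ha with rfl | ha
    · rfl
    · exact ih h a ha
  | case3 c cs hc ih =>
    intro h
    rw [pvToks, if_neg hc] at h
    exact absurd h (by simp)

theorem pvStripR_ccore (m : List Char) :
    pvStripR (pvCCore true m) = ['_'].intercalate (pvToks m) := by
  induction m using pvToks.induct with
  | case1 =>
    rw [pvToks]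
    simp [pvCCore, pvStripR, List.intercalate]
  | case2 cs ih =>
    rw [pvToks, if_pos rfl]
    have hcc : pvCCore true ('_' :: cs) = pvCCore true cs := by
      rw [pvCCore]; simp
    rw [hcc]; exact ih
  | case3 c cs h ih =>
    rw [pvToks, if_neg h]
    have htne : ∀ a ∈ cs.takeWhile (fun a => !(a == '_')), ¬ a = '_' := by
      intro a ha
      have := List.mem_takeWhile_imp ha
      simpa using this
    have hcc : pvCCore true (c :: cs)
        = (c :: cs.takeWhile (fun a => !(a == '_')))
          ++ pvCCore false (cs.dropWhile (fun a => !(a == '_'))) := by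
      rw [pvCCore, if_neg h]
      conv_lhs => rw [← List.takeWhile_append_dropWhile (p := fun a => !(a == '_')) (l := cs)]
      rw [pvCCore_run _ _ htne]
      simp
    rw [hcc]
    have hrunne : ∀ a ∈ (c :: cs.takeWhile (fun a => !(a == '_'))), ¬ a = '_' := by
      intro a ha
      rcases List.mem_cons.mp ha with rfl | ha
      · exact h
      · exact htne a ha
    by_cases hall : ∀ a ∈ cs.dropWhile (fun a => !(a == '_')), a = '_'
    · -- everything after the run is underscores: both sides end at the run
      have h1 : pvToks (cs.dropWhile (fun a => !(a == '_'))) = [] := pvToks_all_us _ hall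
      have h2 : ∀ a ∈ pvCCore false (cs.dropWhile (fun a => !(a == '_'))), a = '_' := by
        cases hd : cs.dropWhile (fun a => !(a == '_')) with
        | nil => simp [pvCCore]
        | cons e es =>
          have he : e = '_' := hall e (by rw [hd]; exact List.mem_cons_self ..)
          rw [pvCCore, if_pos he]
          have hes : pvCCore true es = [] :=
            pvCCore_all_us es (fun a ha => hall a (by rw [hd]; exact List.mem_cons_of_mem _ ha))
          simp [hes]
      rw [pvStripR_append_us _ _ h2, pvStripR_no_us _ hrunne, h1]
      simp [List.intercalate, List.intersperse]
    · -- there is another token after this run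
      have hdne : pvToks (cs.dropWhile (fun a => !(a == '_'))) ≠ [] := by
        intro hnil
        exact hall (pvToks_eq_nil_imp _ hnil)
      cases hd : cs.dropWhile (fun a => !(a == '_')) with
      | nil => exact absurd (by intro a ha; rw [hd] at ha; cases ha) hall
      | cons e es =>
        have he : e = '_' := by
          have := List.head?_dropWhile_not (fun a => !(a == '_')) cs
          rw [hd] at this
          simpa using this
        rw [hd] at hdne ih
        have hts : pvCCore true (e :: es) = pvCCore true es := by
          rw [pvCCore, if_pos he]; simp
        have hccd : pvCCore false (e :: es) = '_' :: pvCCore true (e :: es) := by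
          rw [pvCCore, if_pos he, hts]; simp
        rw [hccd]
        have hkeep : List.dropWhile pvUS (pvCCore true (e :: es)).reverse ≠ [] := by
          intro hnil
          have hh : pvStripR (pvCCore true (e :: es)) = [] := by
            unfold pvStripR; rw [hnil]; rfl
          rw [ih] at hh
          exact pvIntercalate_toks_ne_nil _ hdne hh
        have hsplit : (c :: cs.takeWhile (fun a => !(a == '_'))) ++ '_' :: pvCCore true (e :: es)
            = ((c :: cs.takeWhile (fun a => !(a == '_'))) ++ ['_']) ++ pvCCore true (e :: es) := by
          simp
        rw [hsplit, pvStripR_append_keep _ _ hkeep, ih,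
          pvIntercalate_cons _ _ hdne]
        simp

-- the fuel-driven splitter of PySem agrees with List.splitOn
theorem pvGo_spec (fuel : Nat) : ∀ (l cur : List Char) (acc : List (List Char)),
    l.length ≤ fuel →
    PySem.Chars.splitOn.go ['_'] fuel l cur acc
      = acc.reverse ++ List.modifyHead (fun x => cur.reverse ++ x) (l.splitOn '_') := by
  induction fuel with
  | zero =>
    intro l cur acc h
    have hl : l = [] := List.eq_nil_of_length_eq_zero (Nat.le_zero.mp h)
    subst hl
    rw [show PySem.Chars.splitOn.go ['_'] 0 [] cur acc
        = ((cur.reverse ++ []) :: acc).reverse from rfl]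
    simp [List.splitOn, List.splitOnP_nil]
  | succ fuel ih =>
    intro l cur acc h
    cases l with
    | nil =>
      rw [show PySem.Chars.splitOn.go ['_'] (fuel + 1) [] cur acc
          = (cur.reverse :: acc).reverse from rfl]
      simp [List.splitOn, List.splitOnP_nil]
    | cons c rest =>
      rw [show PySem.Chars.splitOn.go ['_'] (fuel + 1) (c :: rest) cur acc
          = if ['_'].isPrefixOf (c :: rest)
            then PySem.Chars.splitOn.go ['_'] fuel (List.drop (['_'] : List Char).length (c :: rest)) [] (cur.reverse :: acc)
            else PySem.Chars.splitOn.go ['_'] fuel rest (c :: cur) acc from rfl]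
      by_cases hc : c = '_'
      · rw [if_pos (by simp [List.isPrefixOf, hc])]
        rw [show List.drop (['_'] : List Char).length (c :: rest) = rest from rfl]
        rw [ih rest [] (cur.reverse :: acc) (by simp at h; omega)]
        rw [show ((c :: rest).splitOn '_') = [] :: rest.splitOn '_' by
          simp [List.splitOn, List.splitOnP_cons, hc]]
        rcases hsp : rest.splitOn '_' with _ | ⟨h0, tl⟩
        · exact absurd hsp (List.splitOnP_ne_nil _ _)
        · simp
      · rw [if_neg (by simp [List.isPrefixOf]; intro he; exact hc he.symm)]
        rw [ih rest (c :: cur) acc (by simp at h; omega)]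
        rw [show ((c :: rest).splitOn '_') = List.modifyHead (List.cons c) (rest.splitOn '_') by
          simp [List.splitOn, List.splitOnP_cons, hc]]
        rcases hsp : rest.splitOn '_' with _ | ⟨h0, tl⟩
        · exact absurd hsp (List.splitOnP_ne_nil _ _)
        · simp

theorem pvSplitOn_eq (m : List Char) : PySem.Chars.splitOn m ['_'] = m.splitOn '_' := by
  unfold PySem.Chars.splitOn
  rw [pvGo_spec (m.length + 1) m [] [] (by omega)]
  rcases hsp : m.splitOn '_' with _ | ⟨h0, tl⟩
  · exact absurd hsp (List.splitOnP_ne_nil _ _)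
  · simp

theorem pvSplit_run (t : List Char) (d : List Char) (h : ∀ a ∈ t, ¬ a = '_') :
    (t ++ d).splitOn '_' = List.modifyHead (fun x => t ++ x) (d.splitOn '_') := by
  induction t with
  | nil =>
    simp only [List.nil_append]
    rcases hsp : d.splitOn '_' with _ | ⟨h0, tl⟩
    · exact absurd hsp (List.splitOnP_ne_nil _ _)
    · simp
  | cons c cs ih =>
    have hc := h c (List.mem_cons_self ..)
    rw [List.cons_append]
    rw [show ((c :: (cs ++ d)).splitOn '_') = List.modifyHead (List.cons c) ((cs ++ d).splitOn '_') by
      simp [List.splitOn, List.splitOnP_cons, hc]]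
    rw [ih (fun a ha => h a (List.mem_cons_of_mem _ ha))]
    rcases hsp : d.splitOn '_' with _ | ⟨h0, tl⟩
    · exact absurd hsp (List.splitOnP_ne_nil _ _)
    · simp

theorem pvFilter_split (m : List Char) :
    (m.splitOn '_').filter (fun t => !t.isEmpty) = pvToks m := by
  induction m using pvToks.induct with
  | case1 =>
    rw [pvToks]
    simp [List.splitOn, List.splitOnP_nil]
  | case2 cs ih =>
    rw [pvToks, if_pos rfl]
    rw [show (('_' :: cs).splitOn '_') = [] :: cs.splitOn '_' by
      simp [List.splitOn, List.splitOnP_cons]]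
    simpa using ih
  | case3 c cs h ih =>
    rw [pvToks, if_neg h]
    have htne : ∀ a ∈ cs.takeWhile (fun a => !(a == '_')), ¬ a = '_' := by
      intro a ha
      have := List.mem_takeWhile_imp ha
      simpa using this
    rw [show ((c :: cs).splitOn '_') = List.modifyHead (List.cons c) (cs.splitOn '_') by
      simp [List.splitOn, List.splitOnP_cons, h]]
    rw [show cs.splitOn '_'
        = ((cs.takeWhile (fun a => !(a == '_'))) ++ (cs.dropWhile (fun a => !(a == '_')))).splitOn '_' by
      rw [List.takeWhile_append_dropWhile]]
    rw [pvSplit_run _ _ htne]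
    cases hd : cs.dropWhile (fun a => !(a == '_')) with
    | nil =>
      rw [show pvToks ([] : List Char) = [] from by rw [pvToks]]
      simp [List.splitOn, List.splitOnP_nil]
    | cons e es =>
      have he : e = '_' := by
        have := List.head?_dropWhile_not (fun a => !(a == '_')) cs
        rw [hd] at this
        simpa using this
      rw [hd] at ih
      have hsp3 : ((e :: es).splitOn '_') = [] :: es.splitOn '_' := by
        simp [List.splitOn, List.splitOnP_cons, he]
      rw [hsp3]
      rw [hsp3] at ih
      simp only [List.filter_cons] at ih
      simp only [List.isEmpty_nil, Bool.not_true] at ih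
      rw [if_neg (by simp)] at ih
      simp only [List.modifyHead_cons, List.append_nil, List.filter_cons]
      rw [if_pos (by simp), ih]

theorem pvChars_strip_eq (X : List Char) :
    PySem.Chars.stripChars X ['_'] = pvStripR (List.dropWhile pvUS X) := rfl

theorem pvMaster (low : List Char) :
    PySem.Chars.stripChars (pvCore false low) ['_']
      = PySem.Chars.join ['_'] ((PySem.Chars.splitOn (pvMask low) ['_']).filter (fun t => !t.isEmpty)) := by
  rw [pvChars_strip_eq, pvCore_eq_ccore low false, pvCCore_false_dropWhile, pvStripR_ccore,
    pvSplitOn_eq, pvFilter_split]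
  rfl

theorem pvOfList_eq_empty (L : List Char) : (String.ofList L = "") ↔ L = [] := by
  constructor
  · intro h
    have h2 := congrArg String.toList h
    simpa using h2
  · rintro rfl
    rfl

-- ===== VERDICT (by name: the statement is the Claim_ definition above) =====
theorem zones_normalize_name_py_spec : Claim_equal_zones_normalize_name_py := by
  intro name _
  simp only [Spec_zones_normalize_name_py, zones_normalize_name_py, zones_normalize_name_py_alt]
  rw [pvFoldl_core]
  simp only [List.nil_append]
  have hus : ("_" : String).toList = ['_'] := by decide
  rw [show PySem.Str.stripChars (String.ofList (pvCore false (PySem.Str.lower name).toList)) "_"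
      = String.ofList (PySem.Chars.stripChars (pvCore false (PySem.Str.lower name).toList) ['_']) by
    simp [PySem.Str.stripChars, hus]]
  rw [pvMaster]
  rw [show (PySem.Str.lower name).toList.map (fun ch => if PySem.Chars.isalnum ch then ch else '_')
      = pvMask (PySem.Str.lower name).toList from rfl]
  by_cases hL : PySem.Chars.join ['_']
      ((PySem.Chars.splitOn (pvMask (PySem.Str.lower name).toList) ['_']).filter (fun t => !t.isEmpty)) = []
  · rw [hL]
    rw [if_pos ((pvOfList_eq_empty []).mpr rfl)]
    simp
  · rw [if_neg (fun hcon => hL ((pvOfList_eq_empty _).mp hcon)),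
      if_neg (by simpa [List.isEmpty_iff] using hL)]
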